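-- pv_equiv track=rewrite | github.com/1574930549/Python | 做题/最长和谐连续子序列.py | hexie
-- ===== SOURCE A (Python) =====
-- def hexie(arr):
--     n = len(arr)
--     if n <= 1:
--         return False
--     maximum, minimum = arr[0], arr[1]
--     if maximum < minimum:
--         maximum, minimum = minimum, maximum
--     for i in range(2, n):
--         if arr[i] > maximum:
--             maximum = arr[i]
--         elif arr[i] < minimum:
--             minimum = arr[i]
--     return maximum - minimum == 1
-- ===== SOURCE B (Python) =====
-- def hexie(arr):
--     # A harmonious array is exactly one whose distinct values are two
--     # consecutive integers: build the set of values and test that.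
--     s = set(arr)
--     if len(s) != 2:
--         return False
--     x, y = s
--     return abs(x - y) == 1
-- ===== Notes on version B (the rewrite author's own statement) =====
-- stated objective: alternative
-- what changed: Instead of tracking max and min over the array, B builds the set of distinct values and returns whether it consists of exactly two values differing by 1 (equivalent: max-min==1 with n>1 iff the value set is {m, m+1}).
import Mathlib
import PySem

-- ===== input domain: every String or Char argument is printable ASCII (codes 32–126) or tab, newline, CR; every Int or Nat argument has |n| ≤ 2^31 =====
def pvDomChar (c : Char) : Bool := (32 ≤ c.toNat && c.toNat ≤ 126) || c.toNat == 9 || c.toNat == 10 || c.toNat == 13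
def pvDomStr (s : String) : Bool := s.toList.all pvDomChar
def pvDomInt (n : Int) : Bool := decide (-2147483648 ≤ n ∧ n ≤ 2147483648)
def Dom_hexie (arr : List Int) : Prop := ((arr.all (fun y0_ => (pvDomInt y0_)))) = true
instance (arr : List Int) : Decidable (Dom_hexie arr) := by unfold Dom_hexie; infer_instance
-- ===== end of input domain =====

-- B replaces A's running max/min tracking loop by a set-based characterization:
-- the distinct values must be exactly two consecutive integers; objective: alternative.


-- ===== PORT A =====
-- the loop body of A, on the (maximum, minimum) state
def hexieStep (s : Int × Int) (x : Int) : Int × Int :=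
  if x > s.1 then (x, s.2) else if x < s.2 then (s.1, x) else s

def hexie (arr : List Int) : Bool :=
  match arr with
  | [] => false
  | [_] => false
  | a :: b :: rest =>
    let s0 : Int × Int := if a < b then (b, a) else (a, b)
    let s := rest.foldl hexieStep s0
    decide (s.1 - s.2 = 1)

-- ===== PORT B =====
def hexie_alt (arr : List Int) : Bool :=
  let s := PySem.Set.ofList arr
  if s.length = 2 then
    match s with
    | [x, y] => decide ((x - y).natAbs = 1)
    | _ => false
  else false

-- ===== PRECONDITION & SPEC =====
def Spec_hexie (arr : List Int) (out : Bool) : Prop := out = hexie_alt arr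
instance (arr : List Int) (out : Bool) : Decidable (Spec_hexie arr out) := by unfold Spec_hexie; infer_instance

-- ===== CLAIM (what is proved, stated in full; the proofs are below) =====
def Claim_equal_hexie : Prop := ∀ (arr : List Int), Dom_hexie arr → Spec_hexie arr (hexie arr)

-- ===== LEMMAS AND PROOFS =====
-- A's combined loop computes the running max and running min simultaneously
theorem hexieStep_foldl (rest : List Int) (M m : Int) (h : m ≤ M) :
    rest.foldl hexieStep (M, m) = (rest.foldl max M, rest.foldl min m) := by
  induction rest generalizing M m with
  | nil => rfl
  | cons x t ih =>
    simp only [List.foldl_cons, hexieStep]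
    split_ifs with h1 h2
    · rw [ih x m (le_of_lt (lt_of_le_of_lt h h1))]
      rw [max_eq_right (le_of_lt h1), min_eq_left (le_of_lt (lt_of_le_of_lt h h1))]
    · rw [ih M x (le_of_lt (lt_of_lt_of_le h2 h))]
      rw [max_eq_left (le_of_lt (lt_of_lt_of_le h2 h)), min_eq_right (le_of_lt h2)]
    · rw [ih M m h]
      rw [max_eq_left (le_of_not_gt h1), min_eq_left (le_of_not_gt h2)]

theorem mem_foldl_max (t : List Int) (a : Int) : t.foldl max a ∈ a :: t := by
  induction t generalizing a with
  | nil => simp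
  | cons x t ih =>
    simp only [List.foldl_cons]
    rcases List.mem_cons.mp (ih (max a x)) with h | h
    · rcases max_choice a x with hm | hm <;> rw [hm] at h ⊢ <;> simp [h]
    · simp [h]

theorem mem_foldl_min (t : List Int) (a : Int) : t.foldl min a ∈ a :: t := by
  induction t generalizing a with
  | nil => simp
  | cons x t ih =>
    simp only [List.foldl_cons]
    rcases List.mem_cons.mp (ih (min a x)) with h | h
    · rcases min_choice a x with hm | hm <;> rw [hm] at h ⊢ <;> simp [h]
    · simp [h]

theorem le_foldl_max (t : List Int) (a : Int) : ∀ y ∈ a :: t, y ≤ t.foldl max a := by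
  induction t generalizing a with
  | nil => intro y hy; simp at hy; simp [hy]
  | cons x t ih =>
    intro y hy
    simp only [List.foldl_cons]
    rcases List.mem_cons.mp hy with h | h
    · exact le_trans (h ▸ le_max_left a x) (ih (max a x) _ (List.mem_cons_self))
    · rcases List.mem_cons.mp h with h' | h'
      · exact le_trans (h' ▸ le_max_right a x) (ih (max a x) _ (List.mem_cons_self))
      · exact ih (max a x) y (List.mem_cons_of_mem _ h')

theorem foldl_min_le (t : List Int) (a : Int) : ∀ y ∈ a :: t, t.foldl min a ≤ y := by
  induction t generalizing a with
  | nil => intro y hy; simp at hy; simp [hy]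
  | cons x t ih =>
    intro y hy
    simp only [List.foldl_cons]
    rcases List.mem_cons.mp hy with h | h
    · exact le_trans (ih (min a x) _ (List.mem_cons_self)) (h ▸ min_le_left a x)
    · rcases List.mem_cons.mp h with h' | h'
      · exact le_trans (ih (min a x) _ (List.mem_cons_self)) (h' ▸ min_le_right a x)
      · exact ih (min a x) y (List.mem_cons_of_mem _ h')

-- B on a nonempty list answers exactly "running max − running min = 1"
theorem hexie_alt_cons (a : Int) (t : List Int) :
    hexie_alt (a :: t) = decide (t.foldl max a - t.foldl min a = 1) := by
  set M := t.foldl max a with hM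
  set m := t.foldl min a with hm
  have hMmem : M ∈ a :: t := mem_foldl_max t a
  have hmmem : m ∈ a :: t := mem_foldl_min t a
  have hub : ∀ y ∈ a :: t, y ≤ M := le_foldl_max t a
  have hlb : ∀ y ∈ a :: t, m ≤ y := foldl_min_le t a
  have hset : ∀ y, y ∈ PySem.Set.ofList (a :: t) ↔ y ∈ a :: t := by
    intro y; simp [PySem.Set.mem_ofList]
  have hnd : (PySem.Set.ofList (a :: t)).Nodup := PySem.Set.nodup_ofList (a :: t)
  rw [Bool.eq_iff_iff]
  constructor
  · -- B true → M - m = 1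
    intro hB
    unfold hexie_alt at hB
    simp only [] at hB
    split at hB
    · rename_i hlen
      split at hB
      · rename_i x y heq
        have hx : x ∈ a :: t := (hset x).mp (by rw [heq]; simp)
        have hy : y ∈ a :: t := (hset y).mp (by rw [heq]; simp)
        have hMxy : M = x ∨ M = y := by
          have := (hset M).mpr hMmem; rw [heq] at this; simpa using this
        have hmxy : m = x ∨ m = y := by
          have := (hset m).mpr hmmem; rw [heq] at this; simpa using this
        have h1 : x ≤ M := hub x hx
        have h2 : y ≤ M := hub y hy
        have h3 : m ≤ x := hlb x hx
        have h4 : m ≤ y := hlb y hy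
        have h5 : (x - y).natAbs = 1 := of_decide_eq_true hB
        simp only [decide_eq_true_eq]
        omega
      · exact absurd hB (by simp)
    · exact absurd hB (by simp)
  · -- M - m = 1 → B true
    intro hd
    have hdiff : M - m = 1 := of_decide_eq_true hd
    have hMS : M ∈ PySem.Set.ofList (a :: t) := (hset M).mpr hMmem
    have hmS : m ∈ PySem.Set.ofList (a :: t) := (hset m).mpr hmmem
    have helem : ∀ y ∈ PySem.Set.ofList (a :: t), y = m ∨ y = M := by
      intro y hy
      have hy' := (hset y).mp hy
      have := hub y hy'
      have := hlb y hy'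
      omega
    unfold hexie_alt
    match hS : PySem.Set.ofList (a :: t) with
    | [] => rw [hS] at hMS; simp at hMS
    | [x] =>
      rw [hS] at hMS hmS; simp at hMS hmS; exfalso; omega
    | [x, y] =>
      rw [hS] at hMS hmS hnd helem
      simp only [List.length_cons, List.length_nil]
      rw [if_pos trivial]
      have hxy : x ≠ y := by simp [List.nodup_cons] at hnd; exact hnd
      have hx := helem x (by simp)
      have hy := helem y (by simp)
      simp only [decide_eq_true_eq]
      omega
    | x :: y :: z :: rest =>
      rw [hS] at hnd helem
      have hx := helem x (by simp)
      have hy := helem y (by simp)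
      have hz := helem z (by simp)
      simp only [List.nodup_cons, List.mem_cons] at hnd
      have hxy : x ≠ y := fun h => hnd.1 (Or.inl h)
      have hxz : x ≠ z := fun h => hnd.1 (Or.inr (Or.inl h))
      have hyz : y ≠ z := fun h => hnd.2.1 (Or.inl h)
      exfalso; omega

-- ===== VERDICT (by name: the statement is the Claim_ definition above) =====
theorem hexie_spec : Claim_equal_hexie := by
  intro arr _
  unfold Spec_hexie
  match arr with
  | [] => rfl
  | [a] =>
    rw [hexie_alt_cons a []]
    simp [hexie]
  | a :: b :: rest =>
    rw [hexie_alt_cons a (b :: rest)]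
    simp only [hexie, List.foldl_cons]
    by_cases hab : a < b
    · rw [if_pos hab, hexieStep_foldl rest b a (le_of_lt hab)]
      simp only [max_eq_right (le_of_lt hab), min_eq_left (le_of_lt hab)]
    · rw [if_neg hab, hexieStep_foldl rest a b (le_of_not_gt hab)]
      simp only [max_eq_left (le_of_not_gt hab), min_eq_right (le_of_not_gt hab)]
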